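-- pv_equiv track=rewrite | github.com/simsam8/info135 | labs/lab6/lab6.py | truncation_hash
-- ===== SOURCE A (Python) =====
-- def truncation_hash(key):
--     key = str(key)
--     hash_val = ""
--     two_count = 1
--     five_count = 1
--     for k in key:
--         if two_count == 3:
--             hash_val += k
--             two_count = 0
--         if five_count == 5:
--             hash_val += k
--             five_count = 0
--         two_count += 1
--         five_count += 1
--     return hash_val
-- ===== SOURCE B (Python) =====
-- def truncation_hash(key):
--     s = str(key)
--     twos = [(i, c) for i, c in enumerate(s) if i % 3 == 2]
--     fives = [(i, c) for i, c in enumerate(s) if i % 5 == 4]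
--     out = []
--     a = b = 0
--     while a < len(twos) and b < len(fives):
--         i, c = twos[a]
--         j, d = fives[b]
--         if i < j:
--             out.append(c); a += 1
--         elif j < i:
--             out.append(d); b += 1
--         else:
--             out.append(c); out.append(d); a += 1; b += 1
--     out.extend(c for _, c in twos[a:])
--     out.extend(d for _, d in fives[b:])
--     return "".join(out)
-- ===== Notes on version B (the rewrite author's own statement) =====
-- stated objective: alternative
-- what changed: Replaces A's per-character counter loop (two_count/five_count with resets) by collecting the i%3==2 and i%5==4 index/char hits via enumerate+filters and merging them with a two-pointer scan that keeps the two-rule char before the five-rule char on ties.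
import Mathlib
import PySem

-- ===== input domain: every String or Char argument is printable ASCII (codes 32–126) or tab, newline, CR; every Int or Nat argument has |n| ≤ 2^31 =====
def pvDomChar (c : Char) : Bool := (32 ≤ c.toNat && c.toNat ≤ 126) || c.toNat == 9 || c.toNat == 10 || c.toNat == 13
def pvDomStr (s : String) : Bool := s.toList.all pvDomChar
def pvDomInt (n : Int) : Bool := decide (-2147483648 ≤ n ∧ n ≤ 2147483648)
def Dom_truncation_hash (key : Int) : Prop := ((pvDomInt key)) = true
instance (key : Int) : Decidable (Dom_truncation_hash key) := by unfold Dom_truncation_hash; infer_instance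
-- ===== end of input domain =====

-- B replaces A's counter loop by collecting the index-2-mod-3 and index-4-mod-5 hits and
-- merging them with a two-pointer scan (objective: alternative decomposition, same cost).

-- ===== PORT A =====
-- A's loop state: accumulated chars (hash_val as a char list; String.mk at the end), two_count, five_count.
def pvLoopA : List Char → List Char → Int → Int → List Char
  | [], acc, _, _ => acc
  | k :: ks, acc, t, f =>
    let p1 := if t == 3 then (acc ++ [k], (0 : Int)) else (acc, t)
    let p2 := if f == 5 then (p1.1 ++ [k], (0 : Int)) else (p1.1, f)
    pvLoopA ks p2.1 (p1.2 + 1) (p2.2 + 1)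

def truncation_hash (key : Int) : String :=
  String.mk (pvLoopA (PySem.Int.toStr key).toList [] 1 1)

-- ===== PORT B =====
-- enumerate(s), starting at p
def pvEnumFrom : Nat → List Char → List (Nat × Char)
  | _, [] => []
  | p, c :: t => (p, c) :: pvEnumFrom (p + 1) t

-- the two-pointer while loop of Source B (including the trailing extends)
def pvMerge : List (Nat × Char) → List (Nat × Char) → List Char
  | [], ys => ys.map Prod.snd
  | (i, c) :: xs, [] => c :: pvMerge xs []
  | (i, c) :: xs, (j, d) :: ys =>
    if i < j then c :: pvMerge xs ((j, d) :: ys)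
    else if j < i then d :: pvMerge ((i, c) :: xs) ys
    else c :: d :: pvMerge xs ys

def truncation_hash_alt (key : Int) : String :=
  let e := pvEnumFrom 0 (PySem.Int.toStr key).toList
  String.mk (pvMerge (e.filter fun x => x.1 % 3 == 2) (e.filter fun x => x.1 % 5 == 4))

-- ===== PRECONDITION & SPEC =====
def Spec_truncation_hash (key : Int) (out : String) : Prop := out = truncation_hash_alt key
instance (key : Int) (out : String) : Decidable (Spec_truncation_hash key out) := by unfold Spec_truncation_hash; infer_instance

-- ===== CLAIM (what is proved, stated in full; the proofs are below) =====
def Claim_equal_truncation_hash : Prop := ∀ (key : Int), Dom_truncation_hash key → Spec_truncation_hash key (truncation_hash key)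

-- ===== LEMMAS AND PROOFS =====

-- common specification: chars emitted from position p on
def pvS : Nat → List Char → List Char
  | _, [] => []
  | p, c :: t => (if p % 3 = 2 then [c] else []) ++ (if p % 5 = 4 then [c] else []) ++ pvS (p + 1) t

theorem pvLoopA_spec : ∀ (ks acc : List Char) (p : Nat),
    pvLoopA ks acc ((p % 3 : Nat) + 1) ((p % 5 : Nat) + 1) = acc ++ pvS p ks := by
  intro ks
  induction ks with
  | nil => intro acc p; simp [pvLoopA, pvS]
  | cons k t ih =>
    intro acc p
    have h3 : p % 3 = 0 ∨ p % 3 = 1 ∨ p % 3 = 2 := by omega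
    have h5 : p % 5 = 0 ∨ p % 5 = 1 ∨ p % 5 = 2 ∨ p % 5 = 3 ∨ p % 5 = 4 := by omega
    rcases h3 with h3 | h3 | h3 <;> rcases h5 with h5 | h5 | h5 | h5 | h5 <;>
      ( have h3' : (p + 1) % 3 = (p % 3 + 1) % 3 := by omega
        have h5' : (p + 1) % 5 = (p % 5 + 1) % 5 := by omega
        rw [h3] at h3'
        rw [h5] at h5'
        norm_num at h3' h5'
        have := ih (acc ++ (if p % 3 = 2 then [k] else []) ++ (if p % 5 = 4 then [k] else [])) (p + 1)
        simp [pvLoopA, pvS, h3, h5, h3', h5'] at this ⊢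
        simp [this] )

theorem pvEnumFrom_ge : ∀ (l : List Char) (p : Nat) (x : Nat × Char), x ∈ pvEnumFrom p l → p ≤ x.1 := by
  intro l
  induction l with
  | nil => intro p x h; simp [pvEnumFrom] at h
  | cons c t ih =>
    intro p x h
    simp [pvEnumFrom] at h
    rcases h with h | h
    · simp [h]
    · have := ih (p + 1) x h; omega

theorem pvMerge_cons_left (B : List (Nat × Char)) (i : Nat) (c : Char) (A : List (Nat × Char))
    (h : ∀ x ∈ B, i < x.1) : pvMerge ((i, c) :: A) B = c :: pvMerge A B := by
  cases B with
  | nil => cases A <;> simp [pvMerge]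
  | cons y ys =>
    obtain ⟨j, d⟩ := y
    have : i < j := h (j, d) (by simp)
    simp [pvMerge, this]

theorem pvMerge_cons_right (A : List (Nat × Char)) (j : Nat) (d : Char) (B : List (Nat × Char))
    (h : ∀ x ∈ A, j < x.1) : pvMerge A ((j, d) :: B) = d :: pvMerge A B := by
  cases A with
  | nil => simp [pvMerge]
  | cons x xs =>
    obtain ⟨i, c⟩ := x
    have hj : j < i := h (i, c) (by simp)
    have h1 : ¬ i < j := by omega
    simp [pvMerge, h1, hj]

theorem pvMerge_spec : ∀ (l : List Char) (p : Nat),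
    pvMerge ((pvEnumFrom p l).filter fun x => x.1 % 3 == 2) ((pvEnumFrom p l).filter fun x => x.1 % 5 == 4)
      = pvS p l := by
  intro l
  induction l with
  | nil => intro p; simp [pvEnumFrom, pvS, pvMerge]
  | cons c t ih =>
    intro p
    have hge : ∀ x ∈ pvEnumFrom (p + 1) t, p < x.1 := by
      intro x hx; have := pvEnumFrom_ge t (p + 1) x hx; omega
    have hge3 : ∀ x ∈ (pvEnumFrom (p + 1) t).filter (fun x => x.1 % 3 == 2), p < x.1 := by
      intro x hx; exact hge x (List.mem_of_mem_filter hx)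
    have hge5 : ∀ x ∈ (pvEnumFrom (p + 1) t).filter (fun x => x.1 % 5 == 4), p < x.1 := by
      intro x hx; exact hge x (List.mem_of_mem_filter hx)
    by_cases h3 : p % 3 = 2 <;> by_cases h5 : p % 5 = 4
    · simp [pvEnumFrom, pvS, h3, h5, pvMerge, ih]
    · simp [pvEnumFrom, pvS, h3, h5,
        pvMerge_cons_left _ p c _ hge5, ih]
    · simp [pvEnumFrom, pvS, h3, h5,
        pvMerge_cons_right _ p c _ hge3, ih]
    · simp [pvEnumFrom, pvS, h3, h5, ih]

-- ===== VERDICT (by name: the statement is the Claim_ definition above) =====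
theorem pvLoopA_init (cs : List Char) : pvLoopA cs [] 1 1 = pvS 0 cs := by
  simpa using pvLoopA_spec cs [] 0

theorem truncation_hash_spec : Claim_equal_truncation_hash := by
  intro key _
  show truncation_hash key = truncation_hash_alt key
  unfold truncation_hash truncation_hash_alt
  simp only [pvLoopA_init]
  rw [show (have e := pvEnumFrom 0 (PySem.Int.toStr key).toList;
      String.mk (pvMerge (e.filter fun x => x.1 % 3 == 2) (e.filter fun x => x.1 % 5 == 4)))
      = String.mk (pvS 0 (PySem.Int.toStr key).toList) from by
    simp only []
    rw [pvMerge_spec]]
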